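-- pv_equiv track=rewrite | github.com/junevanlerberghe/cotengra | cotengra/pathfinders/path_basic.py | group_traces_with_order
-- ===== SOURCE A (Python) =====
-- def group_traces_with_order(traces):
--     parent = {}  # union-find parent
--     cluster_traces = {}  # cluster rep -> list of traces
--     cluster_nodes = {}   # cluster rep -> set of nodes
--
--     def find(x):
--         if x not in parent:
--             parent[x] = x
--         if parent[x] != x:
--             parent[x] = find(parent[x])
--         return parent[x]
--
--     def union(x, y):
--         rx, ry = find(x), find(y)
--         if rx == ry:
--             return rx
--         # Merge ry into rx
--         parent[ry] = rx
--         # Merge traces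
--         cluster_traces[rx].extend(cluster_traces[ry])
--         cluster_nodes[rx].update(cluster_nodes[ry])
--         del cluster_traces[ry]
--         del cluster_nodes[ry]
--         return rx
--
--     # Initialize clusters
--     for node in {node for trace in traces for node in trace[:2]}:
--         rep = find(node)
--         cluster_traces[rep] = []
--         cluster_nodes[rep] = {node}
--
--     grouped = []
--     for trace in traces:
--         node1, node2, leg1, leg2 = trace
--         rep1, rep2 = find(node1), find(node2)
--         if rep1 != rep2:
--             # Merge clusters
--             merged_rep = union(rep1, rep2)
--             # Add the current trace after merging
--             cluster_traces[merged_rep].append(trace)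
--             grouped.append((list(cluster_traces[merged_rep]), cluster_nodes[merged_rep].copy()))
--         else:
--             # Same cluster, just append
--             cluster_traces[rep1].append(trace)
--
--     return grouped
-- ===== SOURCE B (Python) =====
-- def group_traces_with_order(traces):
--     # Eager relabeling instead of union-find: node2cluster maps each node to its
--     # cluster id; clusters maps a live cluster id to (traces list, node set).
--     node2cluster = {}
--     clusters = {}
--
--     for trace in traces:
--         for node in trace[:2]:
--             if node not in node2cluster:
--                 node2cluster[node] = node
--                 clusters[node] = {'traces': [], 'nodes': {node}}
--
--     grouped = []
--     for trace in traces: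
--         node1, node2, leg1, leg2 = trace
--         c1 = node2cluster[node1]
--         c2 = node2cluster[node2]
--         if c1 != c2:
--             # fold node2's cluster into node1's (preserves A's trace order)
--             clusters[c1]['traces'].extend(clusters[c2]['traces'])
--             clusters[c1]['nodes'] |= clusters[c2]['nodes']
--             del clusters[c2]
--             node2cluster = {n: (c1 if c == c2 else c)
--                             for n, c in node2cluster.items()}
--             clusters[c1]['traces'].append(trace)
--             grouped.append((list(clusters[c1]['traces']),
--                             clusters[c1]['nodes'].copy()))
--         else:
--             clusters[c1]['traces'].append(trace)
--
--     return grouped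
-- ===== Notes on version B (the rewrite author's own statement) =====
-- stated objective: simpler
-- what changed: Replaces A's recursive union-find (find with path compression, parent-pointer chains) by eager relabeling: a flat node-to-cluster map that is rewritten on each merge, with a single clusters table keyed by live cluster ids, so there is no recursion and no find at all.
import Mathlib
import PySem

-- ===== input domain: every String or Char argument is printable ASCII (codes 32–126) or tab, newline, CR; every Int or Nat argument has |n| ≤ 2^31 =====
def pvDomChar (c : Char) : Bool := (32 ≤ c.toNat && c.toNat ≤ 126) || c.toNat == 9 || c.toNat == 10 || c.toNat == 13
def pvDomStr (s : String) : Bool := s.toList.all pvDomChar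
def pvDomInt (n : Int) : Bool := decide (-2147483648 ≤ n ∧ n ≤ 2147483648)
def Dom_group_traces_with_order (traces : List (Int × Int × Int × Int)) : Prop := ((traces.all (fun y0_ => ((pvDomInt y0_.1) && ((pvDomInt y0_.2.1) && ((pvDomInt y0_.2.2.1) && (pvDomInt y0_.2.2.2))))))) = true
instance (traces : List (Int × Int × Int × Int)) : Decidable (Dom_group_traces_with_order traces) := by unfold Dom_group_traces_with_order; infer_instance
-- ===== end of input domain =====

-- B replaces A's recursive union-find (find with path compression) by eager relabeling:
-- a flat node→cluster map rewritten on each merge, plus one clusters table (objective: simpler).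
-- Snapshots hold Python sets of nodes; both ports build them with PySem.Set.

abbrev T4 := Int × Int × Int × Int
abbrev Snap := (List T4) × List Int
abbrev PMap := PySem.Dict Int Int
abbrev CTr := PySem.Dict Int (List T4)
abbrev CNd := PySem.Dict Int (List Int)
abbrev CLB := PySem.Dict Int (List T4 × List Int)

-- ===== PORT A =====
-- A's recursive `find` with path compression; the fuel argument only bounds the
-- recursion depth for totality (traces.length + 1 always suffices, see the proofs).
def findA : Nat → PMap → Int → Int × PMap
  | fuel, parent, x =>
    let p1 := if parent.contains x then parent else parent.insert x x
    match p1.get? x with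
    | none => (x, p1)   -- unreachable: p1 always contains x
    | some px =>
      if px = x then (x, p1)
      else
        match fuel with
        | 0 => (px, p1)  -- fuel guard, never reached with fuel = traces.length + 1
        | f+1 =>
          let rp := findA f p1 px
          (rp.1, rp.2.insert x rp.1)

def unionA (fuel : Nat) (parent : PMap) (ctr : CTr) (cnd : CNd) (x y : Int) :
    Int × PMap × CTr × CNd :=
  let fx := findA fuel parent x
  let fy := findA fuel fx.2 y
  if fx.1 = fy.1 then (fx.1, fy.2, ctr, cnd)
  else
    let parent' := fy.2.insert fy.1 fx.1
    let ctr' := (ctr.modify fx.1 [] (· ++ ctr.getD fy.1 [])).erase fy.1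
    let cnd' := (cnd.modify fx.1 [] (fun s => PySem.Set.update s (cnd.getD fy.1 []))).erase fy.1
    (fx.1, parent', ctr', cnd')

def stepInitA (fuel : Nat) (st : PMap × CTr × CNd) (node : Int) : PMap × CTr × CNd :=
  let f := findA fuel st.1 node
  (f.2, st.2.1.insert f.1 [], st.2.2.insert f.1 (PySem.Set.ofList [node]))

def stepA (fuel : Nat) (st : PMap × CTr × CNd × List Snap) (t : T4) : PMap × CTr × CNd × List Snap :=
  let f1 := findA fuel st.1 t.1
  let f2 := findA fuel f1.2 t.2.1
  if f1.1 ≠ f2.1 then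
    let u := unionA fuel f2.2 st.2.1 st.2.2.1 f1.1 f2.1
    let ctr' := u.2.2.1.modify u.1 [] (· ++ [t])
    (u.2.1, ctr', u.2.2.2, st.2.2.2 ++ [(ctr'.getD u.1 [], u.2.2.2.getD u.1 [])])
  else
    (f2.2, st.2.1.modify f1.1 [] (· ++ [t]), st.2.2.1, st.2.2.2)

def group_traces_with_order (traces : List T4) : List Snap :=
  let fuel := traces.length + 1
  let st0 := (PySem.Set.ofList (traces.flatMap (fun t => [t.1, t.2.1]))).foldl (stepInitA fuel)
      (PySem.Dict.empty, PySem.Dict.empty, PySem.Dict.empty)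
  let st := traces.foldl (stepA fuel) (st0.1, st0.2.1, st0.2.2, [])
  st.2.2.2

-- ===== PORT B =====
-- B's dict comprehension {n: (c1 if c == c2 else c) for n, c in node2cluster.items()}
def relabelB (d : PMap) (c1 c2 : Int) : PMap :=
  PySem.Dict.ofList (d.items.map (fun q => (q.1, if q.2 = c2 then c1 else q.2)))

def stepInitB (st : PMap × CLB) (node : Int) : PMap × CLB :=
  if st.1.contains node then st
  else (st.1.insert node node, st.2.insert node ([], PySem.Set.ofList [node]))

def stepB (st : PMap × CLB × List Snap) (t : T4) : PMap × CLB × List Snap :=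
  let c1 := st.1.getD t.1 0
  let c2 := st.1.getD t.2.1 0
  if c1 ≠ c2 then
    let p2 := st.2.1.getD c2 ([], [])
    let cl1 := st.2.1.modify c1 ([], []) (fun p => (p.1 ++ p2.1, PySem.Set.union p.2 p2.2))
    let cl2 := cl1.erase c2
    let n2c' := relabelB st.1 c1 c2
    let cl3 := cl2.modify c1 ([], []) (fun p => (p.1 ++ [t], p.2))
    (n2c', cl3, st.2.2 ++ [cl3.getD c1 ([], [])])
  else
    (st.1, st.2.1.modify c1 ([], []) (fun p => (p.1 ++ [t], p.2)), st.2.2)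

def group_traces_with_order_alt (traces : List T4) : List Snap :=
  let st0 := traces.foldl (fun st t => [t.1, t.2.1].foldl stepInitB st) (PySem.Dict.empty, PySem.Dict.empty)
  let st := traces.foldl stepB (st0.1, st0.2, [])
  st.2.2

-- ===== PRECONDITION & SPEC =====
def Spec_group_traces_with_order (traces : List (Int × Int × Int × Int)) (out : List ((List (Int × Int × Int × Int)) × List Int)) : Prop := out = group_traces_with_order_alt traces
instance (traces : List (Int × Int × Int × Int)) (out : List ((List (Int × Int × Int × Int)) × List Int)) : Decidable (Spec_group_traces_with_order traces out) := by unfold Spec_group_traces_with_order; infer_instance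

-- ===== CLAIM (what is proved, stated in full; the proofs are below) =====
def Claim_equal_group_traces_with_order : Prop := ∀ (traces : List (Int × Int × Int × Int)), Dom_group_traces_with_order traces → Spec_group_traces_with_order traces (group_traces_with_order traces)

-- ===== LEMMAS AND PROOFS =====

-- a small fact about Dict.erase (not in the PySem book)
theorem dict_get?_erase_of_ne {ν : Type} (d : PySem.Dict Int ν) {x k : Int} (h : x ≠ k) :
    (d.erase k).get? x = d.get? x := by
  obtain ⟨items⟩ := d
  simp only [PySem.Dict.erase, PySem.Dict.get?]
  congr 1
  induction items with
  | nil => rfl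
  | cons p rest ih =>
    by_cases hp : p.1 = k
    · have hx : (p.1 == x) = false := by simp [hp, Ne.symm h]
      simp [List.filter_cons, hp, List.find?_cons, hx, ih, Ne.symm h]
    · by_cases hx : p.1 = x
      · simp [List.filter_cons, hp, List.find?_cons, hx, ih, h]
      · simp [List.filter_cons, hp, List.find?_cons, hx, ih, h]

-- `RootD p x r d`: following parent pointers from x reaches the root r in exactly d steps
inductive RootD (p : PMap) : Int → Int → Nat → Prop
  | self (x : Int) (h : p.get? x = some x) : RootD p x x 0
  | step (x y r : Int) (d : Nat) (h : p.get? x = some y) (hne : y ≠ x) (hy : RootD p y r d) :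
      RootD p x r (d+1)

theorem RootD_root {p : PMap} {x r : Int} {d : Nat} (h : RootD p x r d) : p.get? r = some r := by
  induction h with
  | self _ h => exact h
  | step => assumption

theorem RootD_unique {p : PMap} {x r r' : Int} {d d' : Nat}
    (h : RootD p x r d) (h' : RootD p x r' d') : r = r' := by
  induction h generalizing r' d' with
  | self x hx =>
    cases h' with
    | self => rfl
    | step _ y _ _ hxy hne _ => rw [hx] at hxy; exact absurd (Option.some.inj hxy).symm hne
  | step x y r d hxy hne hy ih =>
    cases h' with
    | self _ hx => rw [hxy] at hx; exact absurd (Option.some.inj hx) hne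
    | step _ y' _ d' hxy' hne' hy' =>
      rw [hxy] at hxy'
      exact ih (Option.some.inj hxy' ▸ hy')

-- path compression: inserting x ↦ r (its own root) preserves every root, without increasing depth
theorem RootD_insert_compress {p : PMap} {x r : Int} {dx : Nat} (hx : RootD p x r dx) :
    ∀ {z r' : Int} {e : Nat}, RootD p z r' e → ∃ e' ≤ e, RootD (p.insert x r) z r' e' := by
  intro z r' e h
  induction h with
  | self z hz =>
    by_cases hzx : z = x
    · subst hzx
      have hr : r = z := RootD_unique hx (RootD.self z hz)
      subst hr
      exact ⟨0, le_refl 0, RootD.self r (by rw [PySem.Dict.get?_insert_self])⟩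
    · exact ⟨0, le_refl 0, RootD.self z (by rw [PySem.Dict.get?_insert_of_ne _ _ hzx, hz])⟩
  | step z y r'' d hzy hne hy ih =>
    obtain ⟨e', he', hy'⟩ := ih
    by_cases hzx : z = x
    · subst hzx
      have hr : r = r'' := RootD_unique hx (RootD.step z y r'' d hzy hne hy)
      subst hr
      by_cases hrx : r = z
      · subst hrx
        exact ⟨0, by omega, RootD.self r (by simp [PySem.Dict.get?_insert_self])⟩
      · refine ⟨1, by omega, RootD.step z r r 0 (by rw [PySem.Dict.get?_insert_self]) hrx ?_⟩
        exact RootD.self r (by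
          rw [PySem.Dict.get?_insert_of_ne _ _ hrx]
          exact RootD_root hx)
    · exact ⟨e' + 1, by omega,
        RootD.step z y r'' e' (by rw [PySem.Dict.get?_insert_of_ne _ _ hzx, hzy]) hne hy'⟩

-- inserting an edge at a root k does not disturb trees with a different root
theorem RootD_insert_other {p : PMap} {z r : Int} {e : Nat} {k v : Int}
    (h : RootD p z r e) (hrk : r ≠ k) (hk : p.get? k = some k) :
    RootD (p.insert k v) z r e := by
  revert hrk
  induction h with
  | self z hz =>
    intro hrk
    exact RootD.self z (by rw [PySem.Dict.get?_insert_of_ne _ _ hrk, hz])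
  | step z y r d hzy hne hy ih =>
    intro hrk
    have hzk : z ≠ k := by
      intro hzk; subst hzk
      rw [hk] at hzy
      exact hne (Option.some.inj hzy).symm
    exact RootD.step z y r d (by rw [PySem.Dict.get?_insert_of_ne _ _ hzk, hzy]) hne (ih hrk)

-- union edge: everything rooted at c2 becomes rooted at c1
theorem RootD_insert_edge {p : PMap} {z c1 c2 : Int} {e : Nat}
    (h : RootD p z c2 e) (h1 : p.get? c1 = some c1) (hne : c1 ≠ c2) :
    RootD (p.insert c2 c1) z c1 (e+1) := by
  revert hne
  induction h with
  | self z hz =>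
    intro hne
    refine RootD.step z c1 c1 0 (by rw [PySem.Dict.get?_insert_self]) hne ?_
    exact RootD.self c1 (by rw [PySem.Dict.get?_insert_of_ne _ _ hne, h1])
  | step z y c2' d hzy hyne hy ih =>
    intro hne
    have hz2 : z ≠ c2' := by
      intro hzc; subst hzc
      rw [RootD_root hy] at hzy
      exact hyne (Option.some.inj hzy).symm
    exact RootD.step z y c1 (d+1) (by rw [PySem.Dict.get?_insert_of_ne _ _ hz2, hzy]) hyne (ih hne)

theorem findA_root (fuel : Nat) (p : PMap) (x : Int) (h : p.get? x = some x) :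
    findA fuel p x = (x, p) := by
  have hc : p.contains x = true := by rw [PySem.Dict.contains_eq_isSome_get?, h]; rfl
  cases fuel <;> simp [findA, hc, h]

theorem findA_fresh (fuel : Nat) (p : PMap) (x : Int) (h : p.contains x = false) :
    findA fuel p x = (x, p.insert x x) := by
  cases fuel <;> simp [findA, h, PySem.Dict.get?_insert_self]

theorem findA_step (f : Nat) (p : PMap) (x y : Int) (hxy : p.get? x = some y) (hne : y ≠ x) :
    findA (f+1) p x = ((findA f p y).1, (findA f p y).2.insert x (findA f p y).1) := by
  have hcx : p.contains x = true := by rw [PySem.Dict.contains_eq_isSome_get?, hxy]; rfl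
  conv_lhs => rw [findA]
  simp only [hcx, if_true, hxy, hne, if_false]

theorem findA_correct : ∀ (d fuel : Nat) (p : PMap) (x r : Int),
    RootD p x r d → d ≤ fuel →
    (findA fuel p x).1 = r ∧
    (∀ z, (findA fuel p x).2.contains z = p.contains z) ∧
    (∀ z r' e, RootD p z r' e → ∃ e' ≤ e, RootD (findA fuel p x).2 z r' e') := by
  intro d
  induction d with
  | zero =>
    intro fuel p x r h _
    cases h with
    | self _ hx =>
      rw [findA_root fuel p x hx]
      exact ⟨rfl, fun z => rfl, fun z r' e h => ⟨e, le_refl e, h⟩⟩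
  | succ d ih =>
    intro fuel p x r h hle
    cases h with
    | step _ y _ _ hxy hne hy =>
      obtain ⟨f, rfl⟩ : ∃ f, fuel = f + 1 := ⟨fuel - 1, by omega⟩
      have hcx : p.contains x = true := by rw [PySem.Dict.contains_eq_isSome_get?, hxy]; rfl
      obtain ⟨h1, h2, h3⟩ := ih f p y r hy (by omega)
      have hstep := findA_step f p x y hxy hne
      obtain ⟨ex, _, hx0⟩ := h3 x r (d+1) (RootD.step x y r d hxy hne hy)
      rw [hstep, h1]
      refine ⟨rfl, ?_, ?_⟩
      · intro z
        rw [PySem.Dict.contains_insert]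
        by_cases hzx : z = x
        · subst hzx; simp [hcx]
        · simp [hzx, h2 z]
      · intro z r' e hzr
        obtain ⟨e1, he1, h01⟩ := h3 z r' e hzr
        obtain ⟨e2, he2, h02⟩ := RootD_insert_compress hx0 h01
        exact ⟨e2, le_trans he2 he1, h02⟩

theorem items_relabel (d : PMap) (c1 c2 : Int) (hnd : d.keys.Nodup) :
    (relabelB d c1 c2).items = d.items.map (fun q => (q.1, if q.2 = c2 then c1 else q.2)) := by
  have hkeys : ((d.items.map (fun q => (q.1, if q.2 = c2 then c1 else q.2))).map
      (fun q : Int × Int => q.1)).Nodup := by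
    rw [List.map_map]
    exact (show (d.items.map (fun q : Int × Int => q.1)).Nodup by
      simpa [PySem.Dict.keys] using hnd)
  have h := PySem.Dict.items_foldl_insert_fresh
    (d.items.map (fun q => (q.1, if q.2 = c2 then c1 else q.2)))
    (fun q => q.1) (fun q => q.2) PySem.Dict.empty
    (fun a _ => PySem.Dict.contains_empty _) hkeys
  unfold relabelB PySem.Dict.ofList PySem.Dict.update
  exact h.trans (by simp [PySem.Dict.empty])

theorem get?_relabel (d : PMap) (c1 c2 : Int) (hnd : d.keys.Nodup) (x : Int) :
    (relabelB d c1 c2).get? x = (d.get? x).map (fun v => if v = c2 then c1 else v) := by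
  simp only [PySem.Dict.get?, items_relabel d c1 c2 hnd, List.find?_map, Option.map_map]
  rfl

theorem keys_relabel (d : PMap) (c1 c2 : Int) (hnd : d.keys.Nodup) :
    (relabelB d c1 c2).keys = d.keys := by
  simp only [PySem.Dict.keys, items_relabel d c1 c2 hnd, List.map_map]
  rfl

theorem contains_relabel (d : PMap) (c1 c2 : Int) (hnd : d.keys.Nodup) (x : Int) :
    (relabelB d c1 c2).contains x = d.contains x := by
  rw [PySem.Dict.contains_eq_isSome_get?, PySem.Dict.contains_eq_isSome_get?,
    get?_relabel d c1 c2 hnd]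
  cases d.get? x <;> rfl

-- a cluster id is live when some node is labelled with it
def LiveR (n2c : PMap) (r : Int) : Prop := ∃ x, n2c.get? x = some r

-- the simulation invariant between A's union-find state and B's relabeling state
structure SimInv (u : Nat) (parent : PMap) (ctr : CTr) (cnd : CNd) (n2c : PMap) (cl : CLB) : Prop where
  nodup : n2c.keys.Nodup
  contains_eq : ∀ x, parent.contains x = n2c.contains x
  root : ∀ x r, n2c.get? x = some r → ∃ d ≤ u, RootD parent x r d
  live_self : ∀ r, LiveR n2c r → n2c.get? r = some r
  clusters : ∀ r, LiveR n2c r → ∃ ts ns, ctr.get? r = some ts ∧ cnd.get? r = some ns ∧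
      cl.get? r = some (ts, ns)

theorem step_sim {u N : Nat} {parent : PMap} {ctr : CTr} {cnd : CNd} {n2c : PMap} {cl : CLB}
    (hu : u ≤ N) (inv : SimInv u parent ctr cnd n2c cl) (t : T4)
    (ht1 : n2c.contains t.1 = true) (ht2 : n2c.contains t.2.1 = true) :
    ∃ parent' ctr' cnd' n2c' cl' Δ,
      (∀ g, stepA (N+1) (parent, ctr, cnd, g) t = (parent', ctr', cnd', g ++ Δ)) ∧
      (∀ g, stepB (n2c, cl, g) t = (n2c', cl', g ++ Δ)) ∧
      SimInv (u+1) parent' ctr' cnd' n2c' cl' ∧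
      (∀ x, n2c'.contains x = n2c.contains x) := by
  have h1s : (n2c.get? t.1).isSome := by rw [← PySem.Dict.contains_eq_isSome_get?]; exact ht1
  have h2s : (n2c.get? t.2.1).isSome := by rw [← PySem.Dict.contains_eq_isSome_get?]; exact ht2
  obtain ⟨c1, hc1⟩ := Option.isSome_iff_exists.mp h1s
  obtain ⟨c2, hc2⟩ := Option.isSome_iff_exists.mp h2s
  obtain ⟨d1, hd1, hr1⟩ := inv.root t.1 c1 hc1
  obtain ⟨f1a, f1b, f1c⟩ := findA_correct d1 (N+1) parent t.1 c1 hr1 (by omega)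
  obtain ⟨d2, hd2, hr2⟩ := inv.root t.2.1 c2 hc2
  obtain ⟨d2', hd2', hr2'⟩ := f1c t.2.1 c2 d2 hr2
  obtain ⟨f2a, f2b, f2c⟩ := findA_correct d2' (N+1) (findA (N+1) parent t.1).2 t.2.1 c2 hr2'
    (by omega)
  -- notation for the two intermediate parent maps
  set p1 := (findA (N+1) parent t.1).2 with hp1def
  set p2 := (findA (N+1) p1 t.2.1).2 with hp2def
  have hroot1 : p2.get? c1 = some c1 := by
    obtain ⟨e, _, he⟩ := f1c t.1 c1 d1 hr1
    obtain ⟨e', _, he'⟩ := f2c c1 c1 0 (RootD.self c1 (RootD_root he))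
    exact RootD_root he'
  have hroot2 : p2.get? c2 = some c2 := by
    obtain ⟨e', _, he'⟩ := f2c t.2.1 c2 d2' hr2'
    exact RootD_root he'
  have hbc1 : n2c.getD t.1 0 = c1 := PySem.Dict.getD_of_get?_eq_some _ _ hc1
  have hbc2 : n2c.getD t.2.1 0 = c2 := PySem.Dict.getD_of_get?_eq_some _ _ hc2
  -- roots of p2 are the old roots
  have hkeep : ∀ z r e, RootD parent z r e → ∃ e' ≤ e, RootD p2 z r e' := by
    intro z r e h
    obtain ⟨e1, he1, h1⟩ := f1c z r e h
    obtain ⟨e2, he2, h2⟩ := f2c z r e1 h1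
    exact ⟨e2, le_trans he2 he1, h2⟩
  have hcontp2 : ∀ z, p2.contains z = n2c.contains z := by
    intro z; rw [f2b z, f1b z]; exact inv.contains_eq z
  by_cases hcc : c1 = c2
  · -- same cluster: both sides just append the trace to c1's list
    subst hcc
    obtain ⟨ts1, ns1, hts1, hns1, hcl1⟩ := inv.clusters c1 ⟨t.1, hc1⟩
    refine ⟨p2, ctr.modify c1 [] (· ++ [t]), cnd, n2c,
      cl.modify c1 ([], []) (fun p => (p.1 ++ [t], p.2)), [], ?_, ?_, ?_, fun _ => rfl⟩
    · intro g
      simp only [stepA]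
      simp only [← hp1def, ← hp2def, f1a, f2a]
      simp
    · intro g
      simp only [stepB, hbc1, hbc2]
      simp
    · refine ⟨inv.nodup, hcontp2, ?_, inv.live_self, ?_⟩
      · intro x r h
        obtain ⟨d, hd, hr⟩ := inv.root x r h
        obtain ⟨e, he, h'⟩ := hkeep x r d hr
        exact ⟨e, by omega, h'⟩
      · intro r hl
        obtain ⟨ts, ns, hts, hns, hcl⟩ := inv.clusters r hl
        by_cases hrc : r = c1
        · subst hrc
          refine ⟨ts ++ [t], ns, ?_, hns, ?_⟩
          · simp only [PySem.Dict.modify, PySem.Dict.getD_of_get?_eq_some _ _ hts,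
              PySem.Dict.get?_insert_self]
          · simp [PySem.Dict.modify, PySem.Dict.getD_of_get?_eq_some _ _ hcl,
              PySem.Dict.get?_insert_self]
        · refine ⟨ts, ns, ?_, hns, ?_⟩
          · simp only [PySem.Dict.modify]
            rw [PySem.Dict.get?_insert_of_ne _ _ hrc, hts]
          · simp only [PySem.Dict.modify]
            rw [PySem.Dict.get?_insert_of_ne _ _ hrc, hcl]
  · -- merge: c2's cluster is folded into c1's
    have hl1 : n2c.get? c1 = some c1 := inv.live_self c1 ⟨t.1, hc1⟩
    have hl2 : n2c.get? c2 = some c2 := inv.live_self c2 ⟨t.2.1, hc2⟩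
    have hcont2 : n2c.contains c2 = true := by
      rw [PySem.Dict.contains_eq_isSome_get?, hl2]; rfl
    obtain ⟨ts1, ns1, hts1, hns1, hcl1⟩ := inv.clusters c1 ⟨t.1, hc1⟩
    obtain ⟨ts2, ns2, hts2, hns2, hcl2⟩ := inv.clusters c2 ⟨t.2.1, hc2⟩
    have hgts1 : ctr.getD c1 [] = ts1 := PySem.Dict.getD_of_get?_eq_some _ _ hts1
    have hgts2 : ctr.getD c2 [] = ts2 := PySem.Dict.getD_of_get?_eq_some _ _ hts2
    have hgns1 : cnd.getD c1 [] = ns1 := PySem.Dict.getD_of_get?_eq_some _ _ hns1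
    have hgns2 : cnd.getD c2 [] = ns2 := PySem.Dict.getD_of_get?_eq_some _ _ hns2
    have hgcl2 : cl.getD c2 ([], []) = (ts2, ns2) := PySem.Dict.getD_of_get?_eq_some _ _ hcl2
    have hgcl1 : cl.getD c1 ([], []) = (ts1, ns1) := PySem.Dict.getD_of_get?_eq_some _ _ hcl1
    -- the merged dictionaries, written in the insert form that Dict.modify unfolds to
    have hctrU1 : ((ctr.insert c1 (ctr.getD c1 [] ++ ctr.getD c2 [])).erase c2).get? c1
        = some (ts1 ++ ts2) := by
      rw [dict_get?_erase_of_ne _ hcc, PySem.Dict.get?_insert_self, hgts1, hgts2]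
    have hctrT1 : ((((ctr.insert c1 (ctr.getD c1 [] ++ ctr.getD c2 [])).erase c2)).insert c1
          ((((ctr.insert c1 (ctr.getD c1 [] ++ ctr.getD c2 [])).erase c2)).getD c1 [] ++ [t])).get? c1
        = some ((ts1 ++ ts2) ++ [t]) := by
      rw [PySem.Dict.get?_insert_self, PySem.Dict.getD_of_get?_eq_some _ _ hctrU1]
    have hcndU1 : ((cnd.insert c1 (PySem.Set.update (cnd.getD c1 []) (cnd.getD c2 []))).erase c2).get? c1
        = some (PySem.Set.update ns1 ns2) := by
      rw [dict_get?_erase_of_ne _ hcc, PySem.Dict.get?_insert_self, hgns1, hgns2]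
    have hclU1 : ((cl.insert c1 ((cl.getD c1 ([], [])).1 ++ (cl.getD c2 ([], [])).1,
          PySem.Set.union (cl.getD c1 ([], [])).2 (cl.getD c2 ([], [])).2)).erase c2).get? c1
        = some (ts1 ++ ts2, PySem.Set.update ns1 ns2) := by
      rw [dict_get?_erase_of_ne _ hcc, PySem.Dict.get?_insert_self, hgcl1, hgcl2]
      rfl
    have hclT1 : (((cl.insert c1 ((cl.getD c1 ([], [])).1 ++ (cl.getD c2 ([], [])).1,
            PySem.Set.union (cl.getD c1 ([], [])).2 (cl.getD c2 ([], [])).2)).erase c2).insert c1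
          (((((cl.insert c1 ((cl.getD c1 ([], [])).1 ++ (cl.getD c2 ([], [])).1,
            PySem.Set.union (cl.getD c1 ([], [])).2 (cl.getD c2 ([], [])).2)).erase c2)).getD c1 ([], [])).1 ++ [t],
           ((((cl.insert c1 ((cl.getD c1 ([], [])).1 ++ (cl.getD c2 ([], [])).1,
            PySem.Set.union (cl.getD c1 ([], [])).2 (cl.getD c2 ([], [])).2)).erase c2)).getD c1 ([], [])).2)).get? c1
        = some ((ts1 ++ ts2) ++ [t], PySem.Set.update ns1 ns2) := by
      rw [PySem.Dict.get?_insert_self, PySem.Dict.getD_of_get?_eq_some _ _ hclU1]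
    refine ⟨p2.insert c2 c1,
      (((ctr.modify c1 [] (· ++ ctr.getD c2 [])).erase c2).modify c1 [] (· ++ [t])),
      ((cnd.modify c1 [] (fun s => PySem.Set.update s (cnd.getD c2 []))).erase c2),
      relabelB n2c c1 c2,
      (((cl.modify c1 ([], []) (fun p => (p.1 ++ (cl.getD c2 ([], [])).1,
          PySem.Set.union p.2 (cl.getD c2 ([], [])).2))).erase c2).modify c1 ([], [])
            (fun p => (p.1 ++ [t], p.2))),
      [((ts1 ++ ts2) ++ [t], PySem.Set.update ns1 ns2)], ?_, ?_, ?_, ?_⟩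
    · intro g
      have hu1 := findA_root (N+1) p2 c1 hroot1
      have hu2 := findA_root (N+1) p2 c2 hroot2
      simp only [stepA]
      simp only [← hp1def, ← hp2def, f1a, f2a]
      simp only [hcc, ite_not, if_false, ite_false, if_neg hcc, unionA, hu1, hu2]
      simp only [PySem.Dict.modify]
      rw [PySem.Dict.getD_of_get?_eq_some _ _ hctrT1, PySem.Dict.getD_of_get?_eq_some _ _ hcndU1]
    · intro g
      simp only [stepB, hbc1, hbc2]
      simp only [hcc, ite_not, if_false, ite_false, if_neg hcc]
      simp only [PySem.Dict.modify]
      rw [PySem.Dict.getD_of_get?_eq_some _ _ hclT1]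
    · -- the invariant after the merge
      have hrel : ∀ x, (relabelB n2c c1 c2).get? x
          = (n2c.get? x).map (fun v => if v = c2 then c1 else v) :=
        get?_relabel n2c c1 c2 inv.nodup
      refine ⟨?_, ?_, ?_, ?_, ?_⟩
      · rw [keys_relabel n2c c1 c2 inv.nodup]; exact inv.nodup
      · intro x
        rw [PySem.Dict.contains_insert, contains_relabel n2c c1 c2 inv.nodup]
        by_cases hx2 : x = c2
        · subst hx2; simp [hcont2]
        · simp [hx2, hcontp2 x]
      · intro x r h
        rw [hrel x] at h
        obtain ⟨v, hv, hfv⟩ := Option.map_eq_some_iff.mp h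
        obtain ⟨dv, hdv, hrv⟩ := inv.root x v hv
        obtain ⟨e, he, h'⟩ := hkeep x v dv hrv
        by_cases hv2 : v = c2
        · subst hv2
          rw [if_pos rfl] at hfv
          subst hfv
          exact ⟨e + 1, by omega, RootD_insert_edge h' hroot1 hcc⟩
        · rw [if_neg hv2] at hfv
          subst hfv
          exact ⟨e, by omega, RootD_insert_other h' hv2 hroot2⟩
      · rintro r ⟨x, hx⟩
        rw [hrel x] at hx
        obtain ⟨v, hv, hfv⟩ := Option.map_eq_some_iff.mp hx
        by_cases hv2 : v = c2
        · subst hv2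
          rw [if_pos rfl] at hfv
          subst hfv
          rw [hrel c1, hl1, Option.map_some]
          simp [hcc]
        · rw [if_neg hv2] at hfv
          subst hfv
          rw [hrel v, inv.live_self v ⟨x, hv⟩, Option.map_some]
          simp [hv2]
      · rintro r ⟨x, hx⟩
        rw [hrel x] at hx
        obtain ⟨v, hv, hfv⟩ := Option.map_eq_some_iff.mp hx
        have hrc2 : r ≠ c2 := by
          intro hr
          rw [hr] at hfv
          by_cases hv2 : v = c2
          · rw [if_pos hv2] at hfv; exact hcc hfv
          · rw [if_neg hv2] at hfv; exact hv2 hfv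
        by_cases hrc1 : r = c1
        · subst hrc1
          refine ⟨(ts1 ++ ts2) ++ [t], PySem.Set.update ns1 ns2, ?_, ?_, ?_⟩
          · simp only [PySem.Dict.modify]; exact hctrT1
          · simp only [PySem.Dict.modify]; exact hcndU1
          · simp only [PySem.Dict.modify]; exact hclT1
        · have hvr : v = r := by
            by_cases hv2 : v = c2
            · subst hv2; rw [if_pos rfl] at hfv; exact absurd hfv.symm hrc1
            · rw [if_neg hv2] at hfv; exact hfv
          subst hvr
          obtain ⟨ts, ns, hts, hns, hcl⟩ := inv.clusters v ⟨x, hv⟩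
          refine ⟨ts, ns, ?_, ?_, ?_⟩
          · simp only [PySem.Dict.modify]
            rw [PySem.Dict.get?_insert_of_ne _ _ hrc1, dict_get?_erase_of_ne _ hrc2,
              PySem.Dict.get?_insert_of_ne _ _ hrc1, hts]
          · simp only [PySem.Dict.modify]
            rw [dict_get?_erase_of_ne _ hrc2, PySem.Dict.get?_insert_of_ne _ _ hrc1, hns]
          · simp only [PySem.Dict.modify]
            rw [PySem.Dict.get?_insert_of_ne _ _ hrc1, dict_get?_erase_of_ne _ hrc2,
              PySem.Dict.get?_insert_of_ne _ _ hrc1, hcl]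
    · intro x
      exact contains_relabel n2c c1 c2 inv.nodup x

theorem loop_sim (N : Nat) : ∀ (rest : List T4) (u : Nat) (parent : PMap) (ctr : CTr)
    (cnd : CNd) (n2c : PMap) (cl : CLB) (g : List Snap),
    u + rest.length ≤ N → SimInv u parent ctr cnd n2c cl →
    (∀ t ∈ rest, n2c.contains t.1 = true ∧ n2c.contains t.2.1 = true) →
    (rest.foldl (stepA (N+1)) (parent, ctr, cnd, g)).2.2.2 =
      (rest.foldl stepB (n2c, cl, g)).2.2 := by
  intro rest
  induction rest with
  | nil => intro u parent ctr cnd n2c cl g _ _ _; rfl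
  | cons t rest ih =>
    intro u parent ctr cnd n2c cl g hlen inv h0
    obtain ⟨p', ctr', cnd', n2c', cl', Δ, hA, hB, inv', hpres⟩ :=
      step_sim (N := N) (u := u) (by simp at hlen; omega) inv t
        (h0 t (List.mem_cons_self)).1 (h0 t (List.mem_cons_self)).2
    simp only [List.foldl_cons, hA g, hB g]
    exact ih (u+1) p' ctr' cnd' n2c' cl' (g ++ Δ) (by simp at hlen ⊢; omega) inv'
      (fun t' ht' => by rw [hpres, hpres]; exact h0 t' (List.mem_cons_of_mem _ ht'))

-- characterization of the two initializations
def InitA (S : List Int) (parent : PMap) (ctr : CTr) (cnd : CNd) : Prop :=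
  ∀ x, (parent.get? x = if x ∈ S then some x else none) ∧
       (ctr.get? x = if x ∈ S then some [] else none) ∧
       (cnd.get? x = if x ∈ S then some [x] else none)

def InitB (S : List Int) (n2c : PMap) (cl : CLB) : Prop :=
  n2c.keys.Nodup ∧
  ∀ x, (n2c.get? x = if x ∈ S then some x else none) ∧
       (cl.get? x = if x ∈ S then some ([], [x]) else none)

theorem stepInitA_char (fuel : Nat) (S : List Int) (parent : PMap) (ctr : CTr) (cnd : CNd)
    (node : Int) (h : InitA S parent ctr cnd) :
    InitA (S ++ [node]) (stepInitA fuel (parent, ctr, cnd) node).1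
      (stepInitA fuel (parent, ctr, cnd) node).2.1 (stepInitA fuel (parent, ctr, cnd) node).2.2 := by
  have hofl : PySem.Set.ofList [node] = [node] := rfl
  by_cases hn : node ∈ S
  · have hg : parent.get? node = some node := by rw [(h node).1]; simp [hn]
    have hf := findA_root fuel parent node hg
    intro x
    by_cases hx : x = node
    · subst hx
      simp only [stepInitA, hf]
      refine ⟨?_, ?_, ?_⟩ <;>
        simp [PySem.Dict.get?_insert_self, hofl, hg, hn]
    · simp only [stepInitA, hf]
      refine ⟨?_, ?_, ?_⟩ <;>
        simp [PySem.Dict.get?_insert_of_ne _ _ hx, (h x).1, (h x).2.1, (h x).2.2, hx]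
  · have hcf : parent.contains node = false := by
      rw [PySem.Dict.contains_eq_isSome_get?, (h node).1]; simp [hn]
    have hf := findA_fresh fuel parent node hcf
    intro x
    by_cases hx : x = node
    · subst hx
      simp only [stepInitA, hf]
      refine ⟨?_, ?_, ?_⟩ <;>
        simp [PySem.Dict.get?_insert_self, hofl]
    · simp only [stepInitA, hf]
      refine ⟨?_, ?_, ?_⟩ <;>
        simp [PySem.Dict.get?_insert_of_ne _ _ hx, (h x).1, (h x).2.1, (h x).2.2, hx]

theorem initA_char (fuel : Nat) : ∀ (l S : List Int) (parent : PMap) (ctr : CTr) (cnd : CNd),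
    InitA S parent ctr cnd →
    InitA (S ++ l) (l.foldl (stepInitA fuel) (parent, ctr, cnd)).1
      (l.foldl (stepInitA fuel) (parent, ctr, cnd)).2.1
      (l.foldl (stepInitA fuel) (parent, ctr, cnd)).2.2 := by
  intro l
  induction l with
  | nil => intro S parent ctr cnd h; simpa using h
  | cons n l ih =>
    intro S parent ctr cnd h
    have hstep := stepInitA_char fuel S parent ctr cnd n h
    have := ih (S ++ [n]) (stepInitA fuel (parent, ctr, cnd) n).1
      (stepInitA fuel (parent, ctr, cnd) n).2.1 (stepInitA fuel (parent, ctr, cnd) n).2.2 hstep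
    simpa [List.append_assoc] using this

theorem stepInitB_char (S : List Int) (n2c : PMap) (cl : CLB) (node : Int)
    (h : InitB S n2c cl) :
    InitB (S ++ [node]) (stepInitB (n2c, cl) node).1 (stepInitB (n2c, cl) node).2 := by
  obtain ⟨hnd, hg⟩ := h
  have hofl : PySem.Set.ofList [node] = [node] := rfl
  by_cases hn : node ∈ S
  · have hc : n2c.contains node = true := by
      rw [PySem.Dict.contains_eq_isSome_get?, (hg node).1]; simp [hn]
    refine ⟨by simpa [stepInitB, hc] using hnd, fun x => ?_⟩
    simp only [stepInitB, hc, if_true]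
    by_cases hx : x = node
    · subst hx; simp [(hg x).1, (hg x).2, hn]
    · simp [(hg x).1, (hg x).2, hx]
  · have hc : n2c.contains node = false := by
      rw [PySem.Dict.contains_eq_isSome_get?, (hg node).1]; simp [hn]
    refine ⟨by simpa [stepInitB, hc] using PySem.Dict.nodup_keys_insert _ _ _ hnd, fun x => ?_⟩
    simp only [stepInitB, hc, Bool.false_eq_true, if_false]
    by_cases hx : x = node
    · subst hx; simp [PySem.Dict.get?_insert_self, hofl]
    · simp [PySem.Dict.get?_insert_of_ne _ _ hx, (hg x).1, (hg x).2, hx]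

theorem initB_char : ∀ (traces : List T4) (S : List Int) (n2c : PMap) (cl : CLB),
    InitB S n2c cl →
    InitB (S ++ traces.flatMap (fun t => [t.1, t.2.1]))
      (traces.foldl (fun st t => [t.1, t.2.1].foldl stepInitB st) (n2c, cl)).1
      (traces.foldl (fun st t => [t.1, t.2.1].foldl stepInitB st) (n2c, cl)).2 := by
  intro traces
  induction traces with
  | nil => intro S n2c cl h; simpa using h
  | cons t traces ih =>
    intro S n2c cl h
    have h1 := stepInitB_char S n2c cl t.1 h
    have h2 := stepInitB_char (S ++ [t.1]) (stepInitB (n2c, cl) t.1).1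
      (stepInitB (n2c, cl) t.1).2 t.2.1 h1
    have := ih ((S ++ [t.1]) ++ [t.2.1]) (stepInitB (stepInitB (n2c, cl) t.1) t.2.1).1
      (stepInitB (stepInitB (n2c, cl) t.1) t.2.1).2 h2
    simpa [List.append_assoc] using this

theorem inv_init (traces : List T4) (parent : PMap) (ctr : CTr) (cnd : CNd)
    (n2c : PMap) (cl : CLB)
    (hA : InitA (PySem.Set.ofList (traces.flatMap (fun t => [t.1, t.2.1]))) parent ctr cnd)
    (hB : InitB (traces.flatMap (fun t => [t.1, t.2.1])) n2c cl) :
    SimInv 0 parent ctr cnd n2c cl ∧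
    (∀ t ∈ traces, n2c.contains t.1 = true ∧ n2c.contains t.2.1 = true) := by
  obtain ⟨hnd, hB'⟩ := hB
  have hmem : ∀ x : Int, x ∈ PySem.Set.ofList (traces.flatMap (fun t => [t.1, t.2.1])) ↔
      x ∈ traces.flatMap (fun t => [t.1, t.2.1]) := fun x => PySem.Set.mem_ofList _ _
  have hcont : ∀ x, x ∈ traces.flatMap (fun t => [t.1, t.2.1]) → n2c.contains x = true := by
    intro x hx
    rw [PySem.Dict.contains_eq_isSome_get?, (hB' x).1]
    simp [hx]
  refine ⟨⟨hnd, ?_, ?_, ?_, ?_⟩, ?_⟩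
  · intro x
    rw [PySem.Dict.contains_eq_isSome_get?, PySem.Dict.contains_eq_isSome_get?,
      (hA x).1, (hB' x).1]
    by_cases hx : x ∈ traces.flatMap (fun t => [t.1, t.2.1]) <;> simp [hx, hmem]
  · intro x r h
    rw [(hB' x).1] at h
    by_cases hx : x ∈ traces.flatMap (fun t => [t.1, t.2.1])
    · rw [if_pos hx] at h
      obtain rfl : x = r := Option.some.inj h
      refine ⟨0, le_refl 0, RootD.self x ?_⟩
      rw [(hA x).1, if_pos ((hmem x).mpr hx)]
    · rw [if_neg hx] at h; exact absurd h (by simp)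
  · rintro r ⟨y, hy⟩
    rw [(hB' y).1] at hy
    by_cases hyS : y ∈ traces.flatMap (fun t => [t.1, t.2.1])
    · rw [if_pos hyS] at hy
      obtain rfl : y = r := Option.some.inj hy
      rw [(hB' y).1, if_pos hyS]
    · rw [if_neg hyS] at hy; exact absurd hy (by simp)
  · rintro r ⟨y, hy⟩
    rw [(hB' y).1] at hy
    by_cases hyS : y ∈ traces.flatMap (fun t => [t.1, t.2.1])
    · rw [if_pos hyS] at hy
      obtain rfl : y = r := Option.some.inj hy
      refine ⟨[], [y], ?_, ?_, ?_⟩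
      · rw [(hA y).2.1, if_pos ((hmem y).mpr hyS)]
      · rw [(hA y).2.2, if_pos ((hmem y).mpr hyS)]
      · rw [(hB' y).2, if_pos hyS]
    · rw [if_neg hyS] at hy; exact absurd hy (by simp)
  · intro t ht
    constructor
    · exact hcont t.1 (List.mem_flatMap.mpr ⟨t, ht, by simp⟩)
    · exact hcont t.2.1 (List.mem_flatMap.mpr ⟨t, ht, by simp⟩)

-- ===== VERDICT (by name: the statement is the Claim_ definition above) =====
theorem group_traces_with_order_spec : Claim_equal_group_traces_with_order := by
  intro traces _
  unfold Spec_group_traces_with_order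
  have hA0 := initA_char (traces.length + 1)
    (PySem.Set.ofList (traces.flatMap (fun t => [t.1, t.2.1]))) []
    PySem.Dict.empty PySem.Dict.empty PySem.Dict.empty
    (fun x => by simp [PySem.Dict.get?_empty])
  have hB0 := initB_char traces [] PySem.Dict.empty PySem.Dict.empty
    ⟨by simp [PySem.Dict.keys_empty], fun x => by simp [PySem.Dict.get?_empty]⟩
  rw [List.nil_append] at hA0 hB0
  obtain ⟨inv0, h0⟩ := inv_init traces _ _ _ _ _ hA0 hB0
  unfold group_traces_with_order group_traces_with_order_alt
  exact loop_sim traces.length traces 0 _ _ _ _ _ [] (by omega) inv0 h0
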